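-- pv_equiv track=rewrite | github.com/alexsfking/python_exercises | hackerearth/exercises/monk_and_search.py | create_search_table
-- ===== SOURCE A (Python) =====
-- def create_search_table(array_list:list)->dict:
--     search_dict=dict()
--     for i in range(len(array_list)):
--         if(array_list[i] in search_dict):
--             search_dict[array_list[i]]['counter']+=1
--         else:
--             search_dict[array_list[i]] = {'index': i, 'counter': 1}
--     return search_dict
-- ===== SOURCE B (Python) =====
-- def create_search_table(array_list: list) -> dict:
--     # pass 1: count every value
--     counts = {}
--     for value in array_list:
--         counts[value] = counts.get(value, 0) + 1
--     # pass 2: record first occurrences in order, with the final count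
--     result = {}
--     for i, value in enumerate(array_list):
--         if value not in result:
--             result[value] = {'index': i, 'counter': counts[value]}
--     return result
-- ===== Notes on version B (the rewrite author's own statement) =====
-- stated objective: idiomatic
-- what changed: B splits the work into two passes: a counting pass building a value-to-count dict, then an enumerate pass that inserts each first-seen value once with its final count, instead of A's single index loop that mutates a nested counter per element.
import Mathlib
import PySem

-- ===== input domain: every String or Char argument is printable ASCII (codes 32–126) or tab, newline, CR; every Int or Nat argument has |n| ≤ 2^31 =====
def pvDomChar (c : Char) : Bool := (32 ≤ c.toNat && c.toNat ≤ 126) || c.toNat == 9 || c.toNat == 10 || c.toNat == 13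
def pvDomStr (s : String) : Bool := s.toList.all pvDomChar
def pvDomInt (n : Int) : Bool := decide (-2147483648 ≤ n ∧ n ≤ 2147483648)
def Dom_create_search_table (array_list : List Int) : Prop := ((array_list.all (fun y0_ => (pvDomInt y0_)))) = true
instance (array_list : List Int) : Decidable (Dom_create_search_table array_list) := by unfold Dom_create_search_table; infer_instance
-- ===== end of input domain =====

-- B replaces A's single index loop (nested counter mutated in place) by two passes: a counting
-- pass and an enumerate pass inserting each first-seen value once with its final count (idiomatic).

-- ===== PORT A =====
-- for i in range(len(array_list)): x = array_list[i] (always in range, so pyGetD's default never fires);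
-- the in-place update of the inner dict is an overwrite at the same key (insert keeps position).
def create_search_table (array_list : List Int) : List (Int × List (String × Int)) :=
  (((PySem.List.pyRange 0 (array_list.length : Int) 1).foldl
      (fun (d : PySem.Dict Int (PySem.Dict String Int)) i =>
        let x := PySem.List.pyGetD array_list i 0
        if d.contains x then
          d.insert x ((d.getD x PySem.Dict.empty).modify "counter" 0 (· + 1))
        else
          d.insert x (PySem.Dict.ofList [("index", i), ("counter", 1)]))
      PySem.Dict.empty).items).map (fun p => (p.1, p.2.items))

-- ===== PORT B =====
def create_search_table_alt (array_list : List Int) : List (Int × List (String × Int)) :=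
  let counts := array_list.foldl
    (fun (d : PySem.Dict Int Int) v => d.insert v (d.getD v 0 + 1)) PySem.Dict.empty
  let result := (PySem.List.enumerate array_list 0).foldl
    (fun (d : PySem.Dict Int (PySem.Dict String Int)) p =>
      if d.contains p.2 then d
      else d.insert p.2 (PySem.Dict.ofList [("index", p.1), ("counter", counts.getD p.2 0)]))
    PySem.Dict.empty
  result.items.map (fun p => (p.1, p.2.items))

-- ===== PRECONDITION & SPEC =====
def Spec_create_search_table (array_list : List Int) (out : List (Int × List (String × Int))) : Prop := out = create_search_table_alt array_list
instance (array_list : List Int) (out : List (Int × List (String × Int))) : Decidable (Spec_create_search_table array_list out) := by unfold Spec_create_search_table; infer_instance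

-- ===== CLAIM (what is proved, stated in full; the proofs are below) =====
def Claim_equal_create_search_table : Prop := ∀ (array_list : List Int), Dom_create_search_table array_list → Spec_create_search_table array_list (create_search_table array_list)

-- ===== LEMMAS AND PROOFS =====

def pvTab (ys : List Int) (cnt : Int → Int) : PySem.Dict Int (PySem.Dict String Int) :=
  PySem.Dict.mk ((PySem.Set.ofList ys).map
    (fun v => (v, PySem.Dict.ofList [("index", (ys.idxOf v : Int)), ("counter", cnt v)])))

theorem pvTab_keys (ys : List Int) (cnt : Int → Int) : (pvTab ys cnt).keys = PySem.Set.ofList ys := by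
  simp [pvTab, PySem.Dict.keys_mk, List.map_map, Function.comp_def]

theorem pvTab_contains (ys : List Int) (cnt : Int → Int) (v : Int) :
    (pvTab ys cnt).contains v = decide (v ∈ ys) := by
  rw [PySem.Dict.contains_eq_decide_mem_keys, pvTab_keys]
  simp [PySem.Set.mem_ofList]

theorem pvTab_nodup_keys (ys : List Int) (cnt : Int → Int) : (pvTab ys cnt).keys.Nodup := by
  rw [pvTab_keys]; exact PySem.Set.nodup_ofList ys

theorem pvTab_getD (ys : List Int) (cnt : Int → Int) {y : Int} (h : y ∈ ys) (d0 : PySem.Dict String Int) :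
    (pvTab ys cnt).getD y d0 = PySem.Dict.ofList [("index", (ys.idxOf y : Int)), ("counter", cnt y)] := by
  apply PySem.Dict.getD_of_mem_items _ _ (pvTab_nodup_keys ys cnt)
  simp only [pvTab]
  exact List.mem_map_of_mem ((PySem.Set.mem_ofList ys y).2 h)

theorem pvSet_append_mem (l : List Int) (y : Int) (h : y ∈ l) :
    PySem.Set.ofList (l ++ [y]) = PySem.Set.ofList l := by
  simp [PySem.Set.ofList_append, PySem.Set.update, PySem.Set.add, PySem.Set.contains, h]

theorem pvSet_append_not_mem (l : List Int) (y : Int) (h : y ∉ l) :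
    PySem.Set.ofList (l ++ [y]) = PySem.Set.ofList l ++ [y] := by
  simp [PySem.Set.ofList_append, PySem.Set.update, PySem.Set.add, PySem.Set.contains,
    PySem.Set.mem_ofList, h]

theorem invB (cnt : PySem.Dict Int Int) (ys : List Int) :
    (PySem.List.enumerate ys 0).foldl
      (fun (d : PySem.Dict Int (PySem.Dict String Int)) p =>
        if d.contains p.2 then d
        else d.insert p.2 (PySem.Dict.ofList [("index", p.1), ("counter", cnt.getD p.2 0)]))
      PySem.Dict.empty
    = pvTab ys (fun v => cnt.getD v 0) := by
  induction ys using List.reverseRecOn with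
  | nil => rfl
  | append_singleton l y ih =>
    rw [PySem.List.enumerate_append, List.foldl_append, ih]
    simp only [PySem.List.enumerate_cons, PySem.List.enumerate_nil, List.foldl_cons, List.foldl_nil]
    by_cases hy : y ∈ l
    · rw [pvTab_contains, decide_eq_true hy, if_pos rfl]
      -- pvTab l cnt = pvTab (l++[y]) cnt
      unfold pvTab
      rw [pvSet_append_mem l y hy]
      congr 1
      apply List.map_congr_left
      intro v hv
      rw [List.idxOf_append, if_pos ((PySem.Set.mem_ofList l v).1 hv)]
    · rw [pvTab_contains]
      rw [decide_eq_false hy, if_neg (by simp)]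
      apply PySem.Dict.ext
      rw [PySem.Dict.items_insert_of_not_contains _ _ (by rw [pvTab_contains]; exact decide_eq_false hy)]
      unfold pvTab
      rw [pvSet_append_not_mem l y hy, List.map_append]
      congr 1
      · apply List.map_congr_left
        intro v hv
        rw [List.idxOf_append, if_pos ((PySem.Set.mem_ofList l v).1 hv)]
      · simp [List.idxOf_append, hy]

theorem invA (ys : List Int) :
    (PySem.List.enumerate ys 0).foldl
      (fun (d : PySem.Dict Int (PySem.Dict String Int)) p =>
        if d.contains p.2 then
          d.insert p.2 ((d.getD p.2 PySem.Dict.empty).modify "counter" 0 (· + 1))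
        else
          d.insert p.2 (PySem.Dict.ofList [("index", p.1), ("counter", 1)]))
      PySem.Dict.empty
    = pvTab ys (fun v => (ys.count v : Int)) := by
  induction ys using List.reverseRecOn with
  | nil => rfl
  | append_singleton l y ih =>
    rw [PySem.List.enumerate_append, List.foldl_append, ih]
    simp only [PySem.List.enumerate_cons, PySem.List.enumerate_nil, List.foldl_cons, List.foldl_nil]
    by_cases hy : y ∈ l
    · rw [pvTab_contains, decide_eq_true hy, if_pos rfl, pvTab_getD _ _ hy]
      apply PySem.Dict.ext
      rw [PySem.Dict.items_insert_of_contains _ _ (by rw [pvTab_contains]; exact decide_eq_true hy)]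
      show List.map _ (pvTab l _).items = _
      unfold pvTab
      rw [pvSet_append_mem l y hy, List.map_map]
      apply List.map_congr_left
      intro v hv
      have hvl : v ∈ l := (PySem.Set.mem_ofList l v).1 hv
      by_cases hvy : v = y
      · subst hvy
        simp only [Function.comp, beq_self_eq_true, if_pos]
        have : ((PySem.Dict.ofList [("index", (l.idxOf v : Int)), ("counter", (l.count v : Int))]).modify "counter" 0 (· + 1))
            = PySem.Dict.ofList [("index", (l.idxOf v : Int)), ("counter", (l.count v : Int) + 1)] := rfl
        rw [this, List.idxOf_append, if_pos hvl, List.count_append]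
        simp
      · simp only [Function.comp]
        rw [if_neg (by simpa using hvy), List.idxOf_append, if_pos hvl, List.count_append]
        simp [Ne.symm hvy]
    · rw [pvTab_contains, decide_eq_false hy, if_neg (by simp)]
      apply PySem.Dict.ext
      rw [PySem.Dict.items_insert_of_not_contains _ _ (by rw [pvTab_contains]; exact decide_eq_false hy)]
      unfold pvTab
      rw [pvSet_append_not_mem l y hy, List.map_append]
      congr 1
      · apply List.map_congr_left
        intro v hv
        have hvl : v ∈ l := (PySem.Set.mem_ofList l v).1 hv
        have hvy : y ≠ v := fun h => hy (h ▸ hvl)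
        simp [List.idxOf_append, hvl, List.count_append, hvy]
      · simp [List.idxOf_append, hy, List.count_append, List.count_eq_zero_of_not_mem hy]

-- ===== VERDICT (by name: the statement is the Claim_ definition above) =====
theorem create_search_table_spec : Claim_equal_create_search_table := by
  intro xs _
  unfold Spec_create_search_table
  have hB : create_search_table_alt xs
      = (pvTab xs (fun v => (PySem.Dict.counter xs).getD v 0)).items.map (fun p => (p.1, p.2.items)) := by
    unfold create_search_table_alt
    simp only [PySem.Dict.foldl_insert_getD_add_one_eq_counter, invB]
  have hA : create_search_table xs
      = (pvTab xs (fun v => (xs.count v : Int))).items.map (fun p => (p.1, p.2.items)) := by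
    unfold create_search_table
    rw [← invA xs, PySem.List.enumerate_eq_map_pyRange xs 0, List.foldl_map]
    rfl
  rw [hA, hB]
  unfold pvTab
  congr 1
  apply List.map_congr_left
  intro v _
  simp [PySem.Dict.getD_counter]
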